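-- pv_equiv track=rewrite | github.com/JulianSampels/ISWC-2026-SJP | code/iswc/dataset_stats.py | _count_directed_paths
-- ===== SOURCE A (Python) =====
-- from typing import Dict, Iterator, List, NamedTuple, Optional, Set, Tuple
--
-- def _count_directed_paths(
--     start: str,
--     target: str,
--     out_adj: Dict[str, List[Tuple[str, str]]],
--     max_depth: int,
--     max_count: int = 200,
-- ) -> int:
--     """Count distinct directed paths from start to target (length ≤ max_depth).
--
--     Paths are acyclic (no entity repeated).  Stops early at max_count.
--     """
--     count = 0
--     # stack items: (current_node, visited_on_path)
--     stack = [(start, frozenset([start]), 0)]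
--     while stack and count < max_count:
--         node, visited, depth = stack.pop()
--         if depth >= max_depth:
--             continue
--         for _, nbr in out_adj.get(node, []):
--             if nbr == target:
--                 count += 1
--                 if count >= max_count:
--                     break
--             elif nbr not in visited:
--                 stack.append((nbr, visited | {nbr}, depth + 1))
--     return count
-- ===== SOURCE B (Python) =====
-- def _count_directed_paths(
--     start: str,
--     target: str,
--     out_adj,
--     max_depth: int,
--     max_count: int = 200,
-- ) -> int:
--     """Count distinct directed paths from start to target (length <= max_depth).
--
--     Recursive DFS re-implementation: an inner `visit` threads the running
--     count through the recursion and short-circuits once it reaches max_count.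
--     """
--     def visit(node, visited, depth, acc):
--         for _, nbr in out_adj.get(node, []):
--             if nbr == target:
--                 acc += 1
--                 if acc >= max_count:
--                     return acc
--             elif depth + 1 < max_depth and nbr not in visited:
--                 acc = visit(nbr, visited | {nbr}, depth + 1, acc)
--                 if acc >= max_count:
--                     return acc
--         return acc
--     if max_count <= 0 or max_depth <= 0:
--         return 0
--     return visit(start, frozenset([start]), 0, 0)
-- ===== Notes on version B (the rewrite author's own statement) =====
-- stated objective: alternative
-- what changed: A's explicit-stack while-loop over (node, visited, depth) tuples is replaced by a recursive DFS helper that threads the capped running count through the recursion and short-circuits once it reaches max_count.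
import Mathlib
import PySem

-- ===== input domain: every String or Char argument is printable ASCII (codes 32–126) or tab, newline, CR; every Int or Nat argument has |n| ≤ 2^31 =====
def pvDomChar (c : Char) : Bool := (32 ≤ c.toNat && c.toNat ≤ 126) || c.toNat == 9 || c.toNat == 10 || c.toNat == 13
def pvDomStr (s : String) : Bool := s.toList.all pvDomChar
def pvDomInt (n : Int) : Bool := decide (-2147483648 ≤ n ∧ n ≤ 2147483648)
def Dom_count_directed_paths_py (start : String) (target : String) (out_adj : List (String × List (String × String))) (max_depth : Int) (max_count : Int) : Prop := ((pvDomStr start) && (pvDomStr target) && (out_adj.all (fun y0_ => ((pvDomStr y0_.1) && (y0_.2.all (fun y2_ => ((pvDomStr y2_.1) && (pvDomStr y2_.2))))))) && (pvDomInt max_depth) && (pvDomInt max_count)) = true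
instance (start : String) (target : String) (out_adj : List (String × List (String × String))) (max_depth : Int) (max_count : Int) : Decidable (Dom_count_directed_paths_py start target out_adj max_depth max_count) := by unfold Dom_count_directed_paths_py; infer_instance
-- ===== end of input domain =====

-- B replaces A's explicit-stack while-loop by a recursive DFS that threads the capped
-- running count through the recursion (objective: alternative decomposition, same cost).

-- ===== PORT A =====

-- max adjacency-list length (used only as a termination measure bound for the A-side loop)
def cdpMaxLen (m : List (String × List (String × String))) : Nat :=
  (m.map (fun p => p.2.length)).foldr max 0

-- the `for _, nbr in out_adj.get(node, [])` body of A: counts direct hits on `target`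
-- (returning early on `break` once the cap is reached) and conses the items appended by
-- `stack.append` onto `acc` (head of the result = last push = next to be popped).
def cdpInner (target : String) (max_count : Int)
    (l : List (String × String)) (visited : PySem.Set String) (depth : Int)
    (count : Int) (acc : List (String × PySem.Set String × Int)) :
    Int × List (String × PySem.Set String × Int) :=
  match l with
  | [] => (count, acc)
  | (_, nbr) :: tl =>
    if nbr == target then
      if max_count ≤ count + 1 then (count + 1, acc)
      else cdpInner target max_count tl visited depth (count + 1) acc
    else if visited.contains nbr then
      cdpInner target max_count tl visited depth count acc
    else
      cdpInner target max_count tl visited depth count ((nbr, visited.add nbr, depth + 1) :: acc)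

-- termination measure: weight of one stack item / of the whole stack
def cdpWt (max_depth : Int) (B : Nat) (it : String × PySem.Set String × Int) : Nat :=
  B ^ (max_depth - it.2.2).toNat
def cdpM (max_depth : Int) (B : Nat) (stack : List (String × PySem.Set String × Int)) : Nat :=
  (stack.map (cdpWt max_depth B)).sum

theorem cdpM_append (max_depth : Int) (B : Nat) (xs ys : List (String × PySem.Set String × Int)) :
    cdpM max_depth B (xs ++ ys) = cdpM max_depth B xs + cdpM max_depth B ys := by
  simp [cdpM]

theorem cdpLen_getD (m : List (String × List (String × String))) (node : String) :
    ((PySem.Dict.mk m).getD node []).length ≤ cdpMaxLen m := by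
  induction m with
  | nil => simp [PySem.Dict.getD, PySem.Dict.get?, cdpMaxLen]
  | cons hd tl ih =>
    obtain ⟨k, v⟩ := hd
    rw [PySem.Dict.getD_eq_get?_getD, PySem.Dict.get?_mk_cons]
    by_cases h : (k == node) = true
    · simp [h, cdpMaxLen]
    · simp only [h, Bool.false_eq_true, if_false]
      rw [← PySem.Dict.getD_eq_get?_getD] at *
      simp only [cdpMaxLen, List.map_cons, List.foldr_cons]
      exact le_trans ih (Nat.le_max_right _ _)

theorem cdpInner_M_le (target : String) (max_count : Int) (max_depth : Int) (B : Nat)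
    (l : List (String × String)) (visited : PySem.Set String) (depth : Int)
    (count : Int) (acc : List (String × PySem.Set String × Int)) :
    cdpM max_depth B (cdpInner target max_count l visited depth count acc).2 ≤
      l.length * B ^ (max_depth - (depth + 1)).toNat + cdpM max_depth B acc := by
  induction l generalizing count acc with
  | nil => simp [cdpInner]
  | cons hd tl ih =>
    obtain ⟨_, nbr⟩ := hd
    simp only [cdpInner]
    have hsm : (tl.length + 1) * B ^ (max_depth - (depth + 1)).toNat =
        tl.length * B ^ (max_depth - (depth + 1)).toNat + B ^ (max_depth - (depth + 1)).toNat :=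
      Nat.succ_mul _ _
    split_ifs with h1 h2 h3
    · simp only [List.length_cons]; omega
    · refine le_trans (ih _ _) ?_; simp only [List.length_cons]; omega
    · refine le_trans (ih _ _) ?_; simp only [List.length_cons]; omega
    · refine le_trans (ih _ _) ?_
      simp only [List.length_cons, cdpM, List.map_cons, List.sum_cons, cdpWt]
      omega

-- the `while stack and count < max_count` loop of A (stack top at the head)
def cdpLoop (target : String) (out_adj : PySem.Dict String (List (String × String)))
    (max_depth : Int) (max_count : Int)
    (stack : List (String × PySem.Set String × Int)) (count : Int) : Int :=
  if max_count ≤ count then count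
  else
    match stack with
    | [] => count
    | (node, visited, depth) :: rest =>
      if max_depth ≤ depth then
        cdpLoop target out_adj max_depth max_count rest count
      else
        let r := cdpInner target max_count (out_adj.getD node []) visited depth count []
        cdpLoop target out_adj max_depth max_count (r.2 ++ rest) r.1
termination_by cdpM max_depth (cdpMaxLen out_adj.items + 1) stack
decreasing_by
  · simp only [cdpM, List.map_cons, List.sum_cons, cdpWt]
    have : 0 < (cdpMaxLen out_adj.items + 1) ^ (max_depth - depth).toNat :=
      Nat.pow_pos (Nat.succ_pos _)
    omega
  · rename_i hcap hd
    set B := cdpMaxLen out_adj.items + 1 with hB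
    have hlen : (out_adj.getD node []).length ≤ cdpMaxLen out_adj.items := by
      have := cdpLen_getD out_adj.items node
      exact this
    have hM := cdpInner_M_le target max_count max_depth B (out_adj.getD node []) visited depth count []
    have he : (max_depth - (depth + 1)).toNat = (max_depth - depth).toNat - 1 := by omega
    have he1 : 1 ≤ (max_depth - depth).toNat := by omega
    rw [cdpM_append]
    simp only [cdpM, List.map_cons, List.sum_cons, cdpWt]
    have hpow : 0 < B ^ ((max_depth - depth).toNat - 1) := Nat.pow_pos (Nat.succ_pos _)
    have hlt : (out_adj.getD node []).length * B ^ (max_depth - (depth + 1)).toNat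
        < B ^ (max_depth - depth).toNat := by
      rw [he]
      calc (out_adj.getD node []).length * B ^ ((max_depth - depth).toNat - 1)
          ≤ (B - 1) * B ^ ((max_depth - depth).toNat - 1) := by
            apply Nat.mul_le_mul_right; omega
        _ < B * B ^ ((max_depth - depth).toNat - 1) :=
            mul_lt_mul_of_pos_right (by omega) hpow
        _ = B ^ ((max_depth - depth).toNat - 1 + 1) := by rw [Nat.pow_succ]; ring
        _ = B ^ (max_depth - depth).toNat := by congr 1; omega
    simp only [cdpM, List.map_nil, List.sum_nil] at hM
    omega

def count_directed_paths_py (start : String) (target : String) (out_adj : List (String × List (String × String))) (max_depth : Int) (max_count : Int) : Int :=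
  cdpLoop target (PySem.Dict.mk out_adj) max_depth max_count
    [(start, PySem.Set.ofList [start], 0)] 0

-- ===== PORT B =====

-- B's inner `visit(node, visited, depth, acc)`: the `for`-loop over `out_adj.get(node, [])`,
-- the recursive call `visit(nbr, …)` appearing as the recursion on `out_adj.getD nbr []`.
def cdpGo (target : String) (out_adj : PySem.Dict String (List (String × String)))
    (max_depth : Int) (max_count : Int)
    (l : List (String × String)) (visited : PySem.Set String) (depth : Int) (acc : Int) : Int :=
  match l with
  | [] => acc
  | (_, nbr) :: tl =>
    if nbr == target then
      if max_count ≤ acc + 1 then acc + 1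
      else cdpGo target out_adj max_depth max_count tl visited depth (acc + 1)
    else if depth + 1 < max_depth && !(visited.contains nbr) then
      let a2 := cdpGo target out_adj max_depth max_count (out_adj.getD nbr [])
        (visited.add nbr) (depth + 1) acc
      if max_count ≤ a2 then a2
      else cdpGo target out_adj max_depth max_count tl visited depth a2
    else cdpGo target out_adj max_depth max_count tl visited depth acc
termination_by ((max_depth - depth).toNat, l.length)
decreasing_by
  · apply Prod.Lex.right; simp
  · apply Prod.Lex.left; simp at *; omega
  · apply Prod.Lex.right; simp
  · apply Prod.Lex.right; simp

def count_directed_paths_py_alt (start : String) (target : String) (out_adj : List (String × List (String × String))) (max_depth : Int) (max_count : Int) : Int :=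
  if max_count ≤ 0 || max_depth ≤ 0 then 0
  else cdpGo target (PySem.Dict.mk out_adj) max_depth max_count
    ((PySem.Dict.mk out_adj).getD start []) (PySem.Set.ofList [start]) 0 0

-- ===== PRECONDITION & SPEC =====
def Spec_count_directed_paths_py (start : String) (target : String) (out_adj : List (String × List (String × String))) (max_depth : Int) (max_count : Int) (out : Int) : Prop := out = count_directed_paths_py_alt start target out_adj max_depth max_count
instance (start : String) (target : String) (out_adj : List (String × List (String × String))) (max_depth : Int) (max_count : Int) (out : Int) : Decidable (Spec_count_directed_paths_py start target out_adj max_depth max_count out) := by unfold Spec_count_directed_paths_py; infer_instance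

-- ===== CLAIM (what is proved, stated in full; the proofs are below) =====
def Claim_equal_count_directed_paths_py : Prop := ∀ (start : String) (target : String) (out_adj : List (String × List (String × String))) (max_depth : Int) (max_count : Int), Dom_count_directed_paths_py start target out_adj max_depth max_count → Spec_count_directed_paths_py start target out_adj max_depth max_count (count_directed_paths_py start target out_adj max_depth max_count)

-- ===== LEMMAS AND PROOFS =====

-- uncapped number of paths contributed by one adjacency list at a given (visited, depth)
def cdpT (target : String) (out_adj : PySem.Dict String (List (String × String)))
    (max_depth : Int)
    (l : List (String × String)) (visited : PySem.Set String) (depth : Int) : Int :=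
  match l with
  | [] => 0
  | (_, nbr) :: tl =>
    (if nbr == target then 1
     else if visited.contains nbr then 0
     else if depth + 1 < max_depth then
       cdpT target out_adj max_depth (out_adj.getD nbr []) (visited.add nbr) (depth + 1)
     else 0)
    + cdpT target out_adj max_depth tl visited depth
termination_by ((max_depth - depth).toNat, l.length)
decreasing_by
  · apply Prod.Lex.left; omega
  · apply Prod.Lex.right; simp

-- uncapped contribution of one stack item / a whole stack
def cdpTI (target : String) (out_adj : PySem.Dict String (List (String × String)))
    (max_depth : Int) (it : String × PySem.Set String × Int) : Int :=
  if max_depth ≤ it.2.2 then 0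
  else cdpT target out_adj max_depth (out_adj.getD it.1 []) it.2.1 it.2.2

def cdpTS (target : String) (out_adj : PySem.Dict String (List (String × String)))
    (max_depth : Int) (stack : List (String × PySem.Set String × Int)) : Int :=
  (stack.map (cdpTI target out_adj max_depth)).sum

-- number of direct target hits in one adjacency list
def cdpH (target : String) : List (String × String) → Int
  | [] => 0
  | (_, nbr) :: tl => (if nbr == target then 1 else 0) + cdpH target tl

-- items pushed for one adjacency list (in final stack order: last push first after reversal)
def cdpPush (target : String) (visited : PySem.Set String) (depth : Int) :
    List (String × String) → List (String × PySem.Set String × Int)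
  | [] => []
  | (_, nbr) :: tl =>
    if nbr == target then cdpPush target visited depth tl
    else if visited.contains nbr then cdpPush target visited depth tl
    else cdpPush target visited depth tl ++ [(nbr, visited.add nbr, depth + 1)]

theorem cdpT_nonneg (target : String) (out_adj : PySem.Dict String (List (String × String)))
    (max_depth : Int) (l : List (String × String)) (visited : PySem.Set String) (depth : Int) :
    0 ≤ cdpT target out_adj max_depth l visited depth := by
  induction l, visited, depth using cdpT.induct out_adj max_depth with
  | case1 visited depth => rw [cdpT.eq_def]
  | case2 visited depth fst nbr tl ihc iht =>
    rw [cdpT.eq_def]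
    simp only []
    split_ifs with h1 h2 h3
    · omega
    · omega
    · have := ihc h3; omega
    · omega

theorem cdpH_nonneg (target : String) (l : List (String × String)) : 0 ≤ cdpH target l := by
  induction l with
  | nil => simp [cdpH]
  | cons hd tl ih => obtain ⟨_, nbr⟩ := hd; rw [cdpH]; split_ifs <;> omega

theorem cdpTS_append (target : String) (out_adj : PySem.Dict String (List (String × String)))
    (max_depth : Int) (xs ys : List (String × PySem.Set String × Int)) :
    cdpTS target out_adj max_depth (xs ++ ys) =
      cdpTS target out_adj max_depth xs + cdpTS target out_adj max_depth ys := by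
  simp [cdpTS]

theorem cdpTS_nonneg (target : String) (out_adj : PySem.Dict String (List (String × String)))
    (max_depth : Int) (stack : List (String × PySem.Set String × Int)) :
    0 ≤ cdpTS target out_adj max_depth stack := by
  induction stack with
  | nil => simp [cdpTS]
  | cons it tl ih =>
    simp only [cdpTS, List.map_cons, List.sum_cons] at *
    have : 0 ≤ cdpTI target out_adj max_depth it := by
      unfold cdpTI; split_ifs
      · omega
      · exact cdpT_nonneg _ _ _ _ _ _
    omega

-- decomposition: the uncapped count of one list = direct hits + contributions of the pushes
theorem cdpT_decomp (target : String) (out_adj : PySem.Dict String (List (String × String)))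
    (max_depth : Int) (l : List (String × String)) (visited : PySem.Set String) (depth : Int) :
    cdpT target out_adj max_depth l visited depth =
      cdpH target l + cdpTS target out_adj max_depth (cdpPush target visited depth l) := by
  induction l with
  | nil => simp [cdpT, cdpH, cdpPush, cdpTS]
  | cons hd tl ih =>
    obtain ⟨_, nbr⟩ := hd
    rw [cdpT, cdpH, cdpPush]
    by_cases h1 : (nbr == target) = true
    · simp only [h1, if_true]; omega
    · simp only [h1, Bool.false_eq_true, if_false]
      by_cases h2 : visited.contains nbr = true
      · simp only [h2, if_true]; omega
      · simp only [h2, Bool.false_eq_true, if_false]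
        rw [cdpTS_append]
        have : cdpTS target out_adj max_depth [(nbr, visited.add nbr, depth + 1)] =
            cdpTI target out_adj max_depth (nbr, visited.add nbr, depth + 1) := by
          simp [cdpTS]
        rw [this]
        unfold cdpTI
        simp only []
        by_cases h3 : depth + 1 < max_depth
        · simp only [h3, if_true, if_neg (by omega : ¬ max_depth ≤ depth + 1)]; omega
        · simp only [h3, if_false, if_pos (by omega : max_depth ≤ depth + 1)]; omega

-- the count returned by one for-loop pass is the capped count of direct hits
theorem cdpInner_fst (target : String) (max_count : Int)
    (l : List (String × String)) (visited : PySem.Set String) (depth : Int) :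
    ∀ (count : Int) (acc : List (String × PySem.Set String × Int)), count < max_count →
    (cdpInner target max_count l visited depth count acc).1 = min (count + cdpH target l) max_count := by
  induction l with
  | nil => intro count acc h; simp [cdpInner, cdpH]; omega
  | cons hd tl ih =>
    intro count acc h
    obtain ⟨_, nbr⟩ := hd
    rw [cdpInner, cdpH]
    by_cases h1 : (nbr == target) = true
    · simp only [h1, if_true]
      by_cases h2 : max_count ≤ count + 1
      · simp only [h2, if_true]
        have := cdpH_nonneg target tl
        omega
      · simp only [h2, if_false]
        rw [ih _ _ (by omega)]
        omega
    · simp only [h1, Bool.false_eq_true, if_false]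
      by_cases h2 : visited.contains nbr = true
      · simp only [h2, if_true]; rw [ih _ _ h]; omega
      · simp only [h2, Bool.false_eq_true, if_false]; rw [ih _ _ h]; omega

-- when the cap is not reached, the pushes are exactly cdpPush (consed onto acc)
theorem cdpInner_snd (target : String) (max_count : Int)
    (l : List (String × String)) (visited : PySem.Set String) (depth : Int) :
    ∀ (count : Int) (acc : List (String × PySem.Set String × Int)),
      count + cdpH target l < max_count →
    (cdpInner target max_count l visited depth count acc).2 =
      cdpPush target visited depth l ++ acc := by
  induction l with
  | nil => intro count acc h; simp [cdpInner, cdpPush]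
  | cons hd tl ih =>
    intro count acc h
    obtain ⟨_, nbr⟩ := hd
    rw [cdpInner, cdpPush]
    rw [cdpH] at h
    by_cases h1 : (nbr == target) = true
    · simp only [h1, if_true] at *
      have hh := cdpH_nonneg target tl
      simp only [if_neg (by omega : ¬ max_count ≤ count + 1)]
      rw [ih _ _ (by omega)]
    · simp only [h1, Bool.false_eq_true, if_false] at *
      by_cases h2 : visited.contains nbr = true
      · simp only [h2, if_true]; rw [ih _ _ (by omega)]
      · simp only [h2, Bool.false_eq_true, if_false]
        rw [ih _ _ (by omega)]
        simp

-- B's recursion computes the capped uncapped-count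
theorem cdpGo_spec (target : String) (out_adj : PySem.Dict String (List (String × String)))
    (max_depth : Int) (max_count : Int)
    (l : List (String × String)) (visited : PySem.Set String) (depth : Int) (acc : Int) :
    acc < max_count →
    cdpGo target out_adj max_depth max_count l visited depth acc =
      min (acc + cdpT target out_adj max_depth l visited depth) max_count := by
  induction l, visited, depth, acc using cdpGo.induct target out_adj max_depth max_count with
  | case1 visited depth acc =>
    intro h; rw [cdpGo.eq_def, cdpT.eq_def]; simp only []; omega
  | case2 visited depth acc fst nbr tl h1 h2 =>
    intro h
    rw [cdpGo.eq_def, cdpT.eq_def]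
    simp only [if_pos h1, if_pos h2]
    have := cdpT_nonneg target out_adj max_depth tl visited depth
    omega
  | case3 visited depth acc fst nbr tl h1 h2 ih =>
    intro h
    rw [cdpGo.eq_def, cdpT.eq_def]
    simp only [if_pos h1, if_neg h2]
    rw [ih (by omega)]
    omega
  | case4 visited depth acc fst nbr tl h1 h2 a2 h3 ihc =>
    intro h
    have h3' : max_count ≤ cdpGo target out_adj max_depth max_count (out_adj.getD nbr []) (visited.add nbr) (depth + 1) acc := h3
    rw [cdpGo.eq_def, cdpT.eq_def]
    simp only [if_neg h1, if_pos h2]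
    rw [if_pos h3']
    have hb := ihc h
    rw [hb] at h3'
    simp only [Bool.and_eq_true, decide_eq_true_eq, Bool.not_eq_true'] at h2
    obtain ⟨h2a, h2b⟩ := h2
    rw [if_neg (by rw [h2b]; exact Bool.false_ne_true : ¬ visited.contains nbr = true), if_pos h2a]
    have ht := cdpT_nonneg target out_adj max_depth tl visited depth
    rw [hb]
    omega
  | case5 visited depth acc fst nbr tl h1 h2 a2 h3 ihc ih =>
    intro h
    have h3' : ¬ max_count ≤ cdpGo target out_adj max_depth max_count (out_adj.getD nbr []) (visited.add nbr) (depth + 1) acc := h3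
    rw [cdpGo.eq_def, cdpT.eq_def]
    simp only [if_neg h1, if_pos h2]
    rw [if_neg h3']
    have hb := ihc h
    rw [hb] at h3'
    have ha2 : cdpGo target out_adj max_depth max_count (out_adj.getD nbr []) (visited.add nbr) (depth + 1) acc < max_count := by
      rw [hb]; omega
    rw [ih ha2]
    have ha2eq : a2 = cdpGo target out_adj max_depth max_count (out_adj.getD nbr []) (visited.add nbr) (depth + 1) acc := rfl
    rw [ha2eq, hb]
    simp only [Bool.and_eq_true, decide_eq_true_eq, Bool.not_eq_true'] at h2
    obtain ⟨h2a, h2b⟩ := h2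
    rw [if_neg (by rw [h2b]; exact Bool.false_ne_true : ¬ visited.contains nbr = true), if_pos h2a]
    have ht := cdpT_nonneg target out_adj max_depth tl visited depth
    omega
  | case6 visited depth acc fst nbr tl h1 h2 ih =>
    intro h
    rw [cdpGo.eq_def, cdpT.eq_def]
    simp only [if_neg h1, if_neg h2]
    rw [ih h]
    simp only [Bool.and_eq_true, decide_eq_true_eq, Bool.not_eq_true', not_and_or] at h2
    by_cases hc : visited.contains nbr = true
    · rw [if_pos hc]
      omega
    · have hcf : visited.contains nbr = false := by
        cases hv : visited.contains nbr
        · rfl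
        · exact absurd hv hc
      have hmd : ¬ depth + 1 < max_depth := by
        rcases h2 with h2 | h2
        · exact h2
        · rw [hcf] at h2; simp at h2
      rw [if_neg (by rw [hcf]; exact Bool.false_ne_true : ¬ visited.contains nbr = true), if_neg hmd]
      omega

-- A's loop computes the capped total contribution of the stack
theorem cdpLoop_spec (target : String) (out_adj : PySem.Dict String (List (String × String)))
    (max_depth : Int) (max_count : Int)
    (stack : List (String × PySem.Set String × Int)) (count : Int) :
    count ≤ max_count →
    cdpLoop target out_adj max_depth max_count stack count =
      min (count + cdpTS target out_adj max_depth stack) max_count := by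
  induction stack, count using cdpLoop.induct target out_adj max_depth max_count with
  | case1 stack count h =>
    intro hle
    rw [cdpLoop.eq_def]
    rw [if_pos h]
    have := cdpTS_nonneg target out_adj max_depth stack
    omega
  | case2 count h =>
    intro hle
    rw [cdpLoop.eq_def]
    rw [if_neg h]
    simp only [cdpTS, List.map_nil, List.sum_nil]
    omega
  | case3 count h node visited depth rest hd ih =>
    intro hle
    rw [cdpLoop.eq_def]
    simp only [if_neg h, if_pos hd]
    rw [ih hle]
    have hTI : cdpTI target out_adj max_depth (node, visited, depth) = 0 := by
      unfold cdpTI; simp [hd]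
    simp only [cdpTS, List.map_cons, List.sum_cons, hTI]
    omega
  | case4 count h node visited depth rest hd r ih =>
    intro hle
    have hr : r = cdpInner target max_count (out_adj.getD node []) visited depth count [] := rfl
    rw [hr] at ih
    rw [cdpLoop.eq_def]
    simp only [if_neg h, if_neg hd]
    have hc : count < max_count := by omega
    have hfst := cdpInner_fst target max_count (out_adj.getD node []) visited depth count [] hc
    have hT := cdpT_decomp target out_adj max_depth (out_adj.getD node []) visited depth
    have hTI : cdpTI target out_adj max_depth (node, visited, depth) =
        cdpT target out_adj max_depth (out_adj.getD node []) visited depth := by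
      unfold cdpTI; simp [hd]
    by_cases hbk : count + cdpH target (out_adj.getD node []) < max_count
    · have hsnd := cdpInner_snd target max_count (out_adj.getD node []) visited depth count [] hbk
      rw [ih (by rw [hfst]; omega)]
      rw [hfst, hsnd]
      simp only [List.append_nil]
      rw [cdpTS_append]
      simp only [cdpTS, List.map_cons, List.sum_cons]
      rw [hTI, hT]
      simp only [cdpTS] at *
      omega
    · rw [ih (by rw [hfst]; omega)]
      rw [hfst]
      have hpos := cdpTS_nonneg target out_adj max_depth
        ((cdpInner target max_count (out_adj.getD node []) visited depth count []).2 ++ rest)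
      have hrest := cdpTS_nonneg target out_adj max_depth rest
      have hpush := cdpTS_nonneg target out_adj max_depth (cdpPush target visited depth (out_adj.getD node []))
      simp only [cdpTS, List.map_cons, List.sum_cons]
      rw [hTI, hT]
      simp only [cdpTS] at *
      omega

-- ===== VERDICT (by name: the statement is the Claim_ definition above) =====
theorem count_directed_paths_py_spec : Claim_equal_count_directed_paths_py := by
  intro start target out_adj max_depth max_count _
  unfold Spec_count_directed_paths_py count_directed_paths_py count_directed_paths_py_alt
  by_cases hcap : max_count ≤ 0
  · rw [cdpLoop.eq_def]
    rw [if_pos hcap]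
    simp [hcap]
  · have h0 : (0 : Int) ≤ max_count := by omega
    rw [cdpLoop_spec target (PySem.Dict.mk out_adj) max_depth max_count _ 0 h0]
    by_cases hmd : max_depth ≤ 0
    · have hTI : cdpTI target (PySem.Dict.mk out_adj) max_depth (start, PySem.Set.ofList [start], 0) = 0 := by
        unfold cdpTI; simp [hmd]
      simp only [cdpTS, List.map_cons, List.map_nil, List.sum_cons, List.sum_nil, hTI]
      simp [hcap, hmd]
      omega
    · have hguard : (decide (max_count ≤ 0) || decide (max_depth ≤ 0)) = false := by
        simp [hcap, hmd]
      rw [if_neg (by rw [hguard]; simp : ¬ (decide (max_count ≤ 0) || decide (max_depth ≤ 0)) = true)]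
      rw [cdpGo_spec target (PySem.Dict.mk out_adj) max_depth max_count _ _ _ 0 (by omega)]
      have hTI : cdpTI target (PySem.Dict.mk out_adj) max_depth (start, PySem.Set.ofList [start], 0) =
          cdpT target (PySem.Dict.mk out_adj) max_depth ((PySem.Dict.mk out_adj).getD start []) (PySem.Set.ofList [start]) 0 := by
        unfold cdpTI; simp [hmd]
      simp only [cdpTS, List.map_cons, List.map_nil, List.sum_cons, List.sum_nil, hTI]
      omega
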